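-- pv_equiv track=rewrite | github.com/hamdan-codes/CodeJam-2021-Qual-Solutions | CodeJam_3_Reversort_Engineering.py | do_operation
-- ===== SOURCE A (Python) =====
-- def do_operation(n, p):
--
-- 	if p < n-1:
-- 		return []
-- 	l = []
-- 	t = 0
-- 	c = 1
-- 	for i in range(n-1, 0, -1):
-- 		c += 1
--
-- 		if t+c+i-1 >= p:
-- 			r = p-t-i+1
-- 			l.append(r)
-- 			for k in range(i-1):
-- 				l.append(1)
-- 			t = p
-- 			break
-- 		t += c
-- 		l.append(c)
-- 	if t<p:
-- 		return []
-- 	return l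
-- ===== SOURCE B (Python) =====
-- def _least_tri(q):
--     # smallest m >= 1 with m*(m+1)//2 >= q  (requires q >= 1); binary search
--     lo, hi = 1, q
--     while lo < hi:
--         mid = (lo + hi) // 2
--         if mid * (mid + 1) // 2 >= q:
--             hi = mid
--         else:
--             lo = mid + 1
--     return lo
--
-- def do_operation(n, p):
--     # closed-form construction: the answer is always a maxed-out prefix 2,3,...,j+1,
--     # one remainder element, then all ones; solve for the break index j arithmetically
--     if n < 2 or p < n - 1 or p > n * (n + 1) // 2 - 1:
--         return []
--     q = p - n + 1
--     m = 1 if q <= 0 else _least_tri(q)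
--     j = m - 1
--     s = m * (m + 1) // 2 - 1          # sum of the maxed prefix 2..j+1
--     r = p - s - (n - 1 - j) + 1
--     return list(range(2, j + 2)) + [r] + [1] * (n - 2 - j)
-- ===== Notes on version B (the rewrite author's own statement) =====
-- stated objective: alternative
-- what changed: Replaces A's step-by-step greedy simulation (accumulator t, counter c, break, inner fill loop) with a closed-form construction: binary-search the triangular-number inequality for the break index m, then emit range(2, m+1) + [remainder] + [1]*(n-1-m) directly, with an explicit p > n(n+1)//2 - 1 feasibility test instead of A's post-loop t < p check.
import Mathlib
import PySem

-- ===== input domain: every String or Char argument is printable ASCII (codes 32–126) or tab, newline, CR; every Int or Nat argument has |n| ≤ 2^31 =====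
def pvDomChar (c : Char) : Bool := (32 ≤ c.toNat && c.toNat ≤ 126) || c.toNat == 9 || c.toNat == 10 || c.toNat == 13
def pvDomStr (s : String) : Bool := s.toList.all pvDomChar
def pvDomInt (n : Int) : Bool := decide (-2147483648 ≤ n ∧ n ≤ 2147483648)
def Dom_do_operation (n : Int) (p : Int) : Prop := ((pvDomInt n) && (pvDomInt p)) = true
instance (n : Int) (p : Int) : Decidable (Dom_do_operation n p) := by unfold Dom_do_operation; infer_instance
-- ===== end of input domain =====

-- B replaces A's simulated greedy loop by a closed-form construction: it solves
-- arithmetically (binary search on a triangular-number inequality) for the index where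
-- A's greedy would break, then emits the answer as ranges — no per-element greedy pass.

-- ===== PORT A =====
-- the for-loop over range(n-1, 0, -1); state (t, c); returns (appended list, final t);
-- the break branch appends the remainder r, runs the inner fill-with-1s loop and sets t = p.
def doOpLoopA (p : Int) : List Int → Int → Int → (List Int × Int)
  | [], t, _c => ([], t)
  | i :: rest, t, c =>
    let c' := c + 1
    if t + c' + i - 1 ≥ p then
      (((p - t - i + 1) :: (PySem.List.pyRange 0 (i - 1) 1).map (fun _ => (1 : Int))), p)
    else
      let res := doOpLoopA p rest (t + c') c'
      (c' :: res.1, res.2)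

def do_operation (n : Int) (p : Int) : List Int :=
  if p < n - 1 then []
  else
    let res := doOpLoopA p (PySem.List.pyRange (n - 1) 0 (-1)) 0 1
    if res.2 < p then [] else res.1

-- ===== PORT B =====
-- midpoint bounds, used by leastTri's termination proof
theorem pvMidLt {lo hi : Int} (h : lo < hi) :
    lo ≤ PySem.Int.floordiv (lo + hi) 2 ∧ PySem.Int.floordiv (lo + hi) 2 < hi := by
  rw [PySem.Int.floordiv_eq_ediv_of_pos (by norm_num)]
  omega

-- _least_tri: smallest m ≥ 1 with m*(m+1)//2 ≥ q, by binary search (Source B's while-loop)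
def leastTri (q lo hi : Int) : Int :=
  if h : lo < hi then
    if q ≤ PySem.Int.floordiv (PySem.Int.floordiv (lo + hi) 2 * (PySem.Int.floordiv (lo + hi) 2 + 1)) 2
    then leastTri q lo (PySem.Int.floordiv (lo + hi) 2)
    else leastTri q (PySem.Int.floordiv (lo + hi) 2 + 1) hi
  else lo
termination_by (hi - lo).toNat
decreasing_by
  · have := pvMidLt h; omega
  · have := pvMidLt h; omega

def do_operation_alt (n : Int) (p : Int) : List Int :=
  if n < 2 ∨ p < n - 1 ∨ p > PySem.Int.floordiv (n * (n + 1)) 2 - 1 then []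
  else
    let q := p - n + 1
    let m := if q ≤ 0 then 1 else leastTri q 1 q
    let j := m - 1
    let s := PySem.Int.floordiv (m * (m + 1)) 2 - 1
    let r := p - s - (n - 1 - j) + 1
    PySem.List.pyRange 2 (j + 2) 1 ++ [r] ++ PySem.List.pyRepeat [1] (n - 2 - j)

-- ===== PRECONDITION & SPEC =====
def Spec_do_operation (n : Int) (p : Int) (out : List Int) : Prop := out = do_operation_alt n p
instance (n : Int) (p : Int) (out : List Int) : Decidable (Spec_do_operation n p out) := by unfold Spec_do_operation; infer_instance

-- ===== CLAIM (what is proved, stated in full; the proofs are below) =====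
def Claim_equal_do_operation : Prop := ∀ (n : Int) (p : Int), Dom_do_operation n p → Spec_do_operation n p (do_operation n p)

-- ===== LEMMAS AND PROOFS =====

-- the m-th triangular number (Euclidean division; divisor positive, so = Python's //)
def Tri (x : Int) : Int := x * (x + 1) / 2

theorem Tri_succ (x : Int) : Tri (x + 1) = Tri x + (x + 1) := by
  unfold Tri
  have h : (x + 1) * (x + 1 + 1) = x * (x + 1) + 2 * (x + 1) := by ring
  omega

theorem Tri_mono {x y : Int} (hx : 0 ≤ x) (hxy : x ≤ y) : Tri x ≤ Tri y := by
  unfold Tri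
  have h : x * (x + 1) ≤ y * (y + 1) := by nlinarith
  omega

theorem floordiv_tri (m : Int) : PySem.Int.floordiv (m * (m + 1)) 2 = Tri m := by
  rw [PySem.Int.floordiv_eq_ediv_of_pos (by norm_num)]; rfl

theorem leastTri_spec (q : Int) : ∀ (d : Nat) (lo hi : Int), (hi - lo).toNat = d →
    1 ≤ lo → lo ≤ hi → q ≤ Tri hi → (∀ b, 1 ≤ b → b < lo → Tri b < q) →
    1 ≤ leastTri q lo hi ∧ q ≤ Tri (leastTri q lo hi) ∧
      ∀ b, 1 ≤ b → b < leastTri q lo hi → Tri b < q := by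
  intro d
  induction d using Nat.strong_induction_on with
  | _ d ih =>
    intro lo hi hd h1 hlh hhi hlo
    rw [leastTri]
    by_cases h : lo < hi
    · rw [dif_pos h]
      have hmid := pvMidLt h
      rw [floordiv_tri]
      by_cases hc : q ≤ Tri (PySem.Int.floordiv (lo + hi) 2)
      · rw [if_pos hc]
        exact ih ((PySem.Int.floordiv (lo + hi) 2 - lo).toNat) (by omega) lo _ rfl h1 (by omega) hc hlo
      · rw [if_neg hc]
        refine ih ((hi - (PySem.Int.floordiv (lo + hi) 2 + 1)).toNat) (by omega) _ hi rfl (by omega) (by omega) hhi ?_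
        intro b hb1 hb2
        by_cases hblo : b < lo
        · exact hlo b hb1 hblo
        · calc Tri b ≤ Tri (PySem.Int.floordiv (lo + hi) 2) := Tri_mono (by omega) (by omega)
            _ < q := by omega
    · rw [dif_neg h]
      have : lo = hi := le_antisymm hlh (by omega)
      exact ⟨h1, this ▸ hhi, hlo⟩

theorem map_one_eq_replicate (l : List Int) :
    l.map (fun _ => (1 : Int)) = List.replicate l.length 1 := by
  induction l with
  | nil => rfl
  | cons x xs ih => simp [List.replicate_succ, ih]

-- A's loop from the state reached after `a` non-breaking steps, when a break is coming:
-- m is the least index with Tri m ≥ p-n+1, and the loop from state a produces the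
-- maxed range, the remainder and the ones, with final t = p.
theorem A_run (n p m : Int) (hm1 : 1 ≤ m) (hm2 : p - n + 1 ≤ Tri m)
    (hmin : ∀ b, 1 ≤ b → b < m → Tri b < p - n + 1) (hmn : m ≤ n - 1) :
    ∀ (k : Nat) (a : Int), 0 ≤ a → (k : Int) = n - 1 - a → (a = 0 ∨ Tri a < p - n + 1) →
    doOpLoopA p (PySem.List.pyRange (k : Int) 0 (-1)) (Tri (a + 1) - 1) (a + 1) =
      (PySem.List.pyRange (a + 2) (m + 1) 1 ++
        (p - (Tri m - 1) - (n - m) + 1) ::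
          (PySem.List.pyRange 0 (n - 1 - m) 1).map (fun _ => (1 : Int)), p) := by
  intro k
  induction k with
  | zero =>
    intro a ha hk hprev
    exfalso
    have ha' : a = n - 1 := by omega
    rcases hprev with h0 | hlt
    · omega
    · have : Tri m ≤ Tri a := Tri_mono (by omega) (by omega)
      omega
  | succ kk ih =>
    intro a ha hk hprev
    have hlt : a < m := by
      rcases hprev with h0 | hlt
      · omega
      · by_contra hge
        have : Tri m ≤ Tri a := Tri_mono (by omega) (by omega)
        omega
    rw [PySem.List.pyRange_neg_one_cons (by exact_mod_cast Nat.succ_pos kk)]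
    simp only [doOpLoopA]
    by_cases hbr : Tri (a + 1) - 1 + (a + 1 + 1) + ((kk + 1 : Nat) : Int) - 1 ≥ p
    · rw [if_pos hbr]
      -- break: this step must be exactly step m-1, i.e. a + 1 = m
      have ham : a + 1 = m := by
        have h1 : Tri (a + 1) ≥ p - n + 1 := by push_cast at hbr hk ⊢; omega
        by_contra hne
        have : Tri (a + 1) < p - n + 1 := hmin (a + 1) (by omega) (by omega)
        omega
      have hnil : PySem.List.pyRange (a + 2) (m + 1) 1 = [] :=
        PySem.List.pyRange_one_eq_nil (by omega)
      rw [hnil]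
      have hk' : ((kk + 1 : Nat) : Int) = n - m := by push_cast at hk ⊢; omega
      have hr : p - (Tri (a + 1) - 1) - ((kk + 1 : Nat) : Int) + 1
          = p - (Tri m - 1) - (n - m) + 1 := by rw [ham, hk']
      have hones : ((kk + 1 : Nat) : Int) - 1 = n - 1 - m := by omega
      simp only [List.nil_append, hr, hones]
    · rw [if_neg hbr]
      have hcond : Tri (a + 1) < p - n + 1 := by
        push_neg at hbr
        push_cast at hbr hk ⊢; omega
      have hnext : Tri (a + 1) - 1 + (a + 1 + 1) = Tri (a + 1 + 1) - 1 := by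
        rw [Tri_succ (a + 1)]; ring
      have hk2 : ((kk + 1 : Nat) : Int) - 1 = (kk : Int) := by push_cast; ring
      rw [hk2, hnext]
      have hlt1 : a + 1 < m := by
        by_contra hge
        have : Tri m ≤ Tri (a + 1) := Tri_mono (by omega) (by omega)
        omega
      have := ih (a + 1) (by omega) (by push_cast at hk ⊢; omega) (Or.inr hcond)
      rw [this]
      have hcons : PySem.List.pyRange (a + 2) (m + 1) 1
          = (a + 2) :: PySem.List.pyRange (a + 3) (m + 1) 1 := by
        rw [PySem.List.pyRange_one_cons (by omega), show a + 2 + 1 = a + 3 from by ring]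
      rw [hcons]
      simp only [List.cons_append, show a + 1 + 1 = a + 2 from by ring,
        show a + 1 + 2 = a + 3 from by ring]

-- A's loop when no break ever fires (p larger than the maximal cost): final t = Tri n - 1.
theorem A_full (n p : Int) (hbig : Tri (n - 1) < p - n + 1) :
    ∀ (k : Nat) (a : Int), 0 ≤ a → (k : Int) = n - 1 - a →
    (doOpLoopA p (PySem.List.pyRange (k : Int) 0 (-1)) (Tri (a + 1) - 1) (a + 1)).2
      = Tri n - 1 := by
  intro k
  induction k with
  | zero =>
    intro a ha hk
    have : a = n - 1 := by omega
    subst this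
    rw [PySem.List.pyRange_neg_one_eq_nil (by omega), show n - 1 + 1 = n from by ring]
    simp only [doOpLoopA]
  | succ kk ih =>
    intro a ha hk
    rw [PySem.List.pyRange_neg_one_cons (by exact_mod_cast Nat.succ_pos kk)]
    simp only [doOpLoopA]
    have hmono : Tri (a + 1) ≤ Tri (n - 1) := Tri_mono (by omega) (by push_cast at hk; omega)
    have hbr : ¬ (Tri (a + 1) - 1 + (a + 1 + 1) + ((kk + 1 : Nat) : Int) - 1 ≥ p) := by
      push_cast at hk ⊢
      omega
    rw [if_neg hbr]
    have hnext : Tri (a + 1) - 1 + (a + 1 + 1) = Tri (a + 1 + 1) - 1 := by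
      rw [Tri_succ (a + 1)]; ring
    have hk2 : ((kk + 1 : Nat) : Int) - 1 = (kk : Int) := by push_cast; ring
    rw [hk2, hnext]
    exact ih (a + 1) (by omega) (by push_cast at hk ⊢; omega)

-- ===== VERDICT (by name: the statement is the Claim_ definition above) =====
theorem do_operation_spec : Claim_equal_do_operation := by
  intro n p _
  unfold Spec_do_operation do_operation do_operation_alt
  dsimp only
  by_cases hp : p < n - 1
  · simp [hp]
  · rw [if_neg hp]
    push_neg at hp
    by_cases hn : n < 2
    · -- empty loop; A returns [] either way, B's guard fires
      rw [PySem.List.pyRange_neg_one_eq_nil (by omega)]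
      simp only [doOpLoopA]
      rw [if_pos (Or.inl hn)]
      split_ifs <;> rfl
    · push_neg at hn
      rw [floordiv_tri n]
      by_cases hmax : p > Tri n - 1
      · -- p too large: A's loop never breaks, final t = Tri n - 1 < p, both return []
        rw [if_pos (Or.inr (Or.inr hmax))]
        have hbig : Tri (n - 1) < p - n + 1 := by
          have := Tri_succ (n - 1)
          simp only [sub_add_cancel] at this
          omega
        have hF := A_full n p hbig (n - 1).toNat 0 le_rfl (by omega)
        rw [Int.toNat_of_nonneg (by omega : (0 : Int) ≤ n - 1)] at hF
        simp only [show Tri 1 - 1 = (0 : Int) from by norm_num [Tri],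
          show (0 : Int) + 1 = 1 from by norm_num] at hF
        rw [if_pos (by omega : (doOpLoopA p (PySem.List.pyRange (n - 1) 0 (-1)) 0 1).2 < p)]
      · -- the real case: A breaks at step m-1; B computes m arithmetically
        push_neg at hmax
        rw [if_neg (by omega : ¬ (n < 2 ∨ p < n - 1 ∨ p > Tri n - 1))]
        set q := p - n + 1 with hq
        have hq0 : 0 ≤ q := by omega
        have hqmax : q ≤ Tri (n - 1) := by
          have := Tri_succ (n - 1)
          simp only [sub_add_cancel] at this
          omega
        -- the m the B-port computes, and its characterisation
        set m := if q ≤ 0 then 1 else leastTri q 1 q with hm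
        have hmspec : 1 ≤ m ∧ q ≤ Tri m ∧ ∀ b, 1 ≤ b → b < m → Tri b < q := by
          by_cases hq1 : q ≤ 0
          · rw [hm, if_pos hq1]
            refine ⟨le_refl 1, by norm_num [Tri]; omega, ?_⟩
            intro b hb1 hb2; omega
          · rw [hm, if_neg hq1]
            push_neg at hq1
            have hTq : q ≤ Tri q := by
              unfold Tri
              have h : q * 2 ≤ q * (q + 1) := by nlinarith
              omega
            exact leastTri_spec q (q - 1).toNat 1 q rfl le_rfl (by omega) hTq
              (fun b hb1 hb2 => by omega)
        obtain ⟨hm1, hm2, hmin⟩ := hmspec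
        have hmn : m ≤ n - 1 := by
          by_contra hgt
          have := hmin (n - 1) (by omega) (by omega)
          omega
        have hA := A_run n p m hm1 (by omega) (fun b h1 h2 => hmin b h1 h2) hmn
          (n - 1).toNat 0 le_rfl (by omega) (Or.inl rfl)
        rw [Int.toNat_of_nonneg (by omega : (0 : Int) ≤ n - 1)] at hA
        simp only [show Tri 1 - 1 = (0 : Int) from by norm_num [Tri],
          show (0 : Int) + 1 = 1 from by norm_num,
          show (0 : Int) + 2 = 2 from by norm_num] at hA
        rw [hA]
        simp only
        rw [if_neg (lt_irrefl p)]
        -- now match the lists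
        rw [floordiv_tri m]
        have hj : m - 1 + 2 = m + 1 := by ring
        rw [hj]
        have hones : PySem.List.pyRepeat [(1 : Int)] (n - 2 - (m - 1))
            = (PySem.List.pyRange 0 (n - 1 - m) 1).map (fun _ => (1 : Int)) := by
          rw [PySem.List.pyRepeat_singleton, map_one_eq_replicate, PySem.List.length_pyRange_one]
          congr 1
          omega
        rw [hones]
        have hr : p - (Tri m - 1) - (n - 1 - (m - 1)) + 1 = p - (Tri m - 1) - (n - m) + 1 := by
          ring
        rw [hr, List.append_assoc, List.singleton_append]
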